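-- pv_equiv track=rewrite | github.com/CatherineFlower/Discretka | dm_main.py | parse_length_hist
-- ===== SOURCE A (Python) =====
-- def parse_length_hist(rows):
--     if not rows or len(rows) < 2: return {}
--     head = [h.strip().lower() for h in rows[0]]
--     try:
--         li = head.index("length")
--     except ValueError:
--         return {}
--     hist = {}
--     for r in rows[1:]:
--         if len(r) <= li: continue
--         try:
--             L = int(r[li])
--         except Exception:
--             continue
--         hist[L] = hist.get(L, 0) + 1
--     return dict(sorted(hist.items()))
-- ===== SOURCE B (Python) =====
-- from itertools import groupby
--
-- def parse_length_hist(rows):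
--     if not rows or len(rows) < 2:
--         return {}
--     head = [h.strip().lower() for h in rows[0]]
--     if "length" not in head:
--         return {}
--     li = head.index("length")
--     lengths = []
--     for r in rows[1:]:
--         if len(r) > li:
--             try:
--                 lengths.append(int(r[li]))
--             except ValueError:
--                 pass
--     return {k: sum(1 for _ in g) for k, g in groupby(sorted(lengths))}
-- ===== Notes on version B (the rewrite author's own statement) =====
-- stated objective: alternative
-- what changed: Replaces the dict-accumulate-then-sort-items strategy by collect-valid-ints-into-a-list, sort the list, then group consecutive equal values (itertools.groupby) into the histogram.
import Mathlib
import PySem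

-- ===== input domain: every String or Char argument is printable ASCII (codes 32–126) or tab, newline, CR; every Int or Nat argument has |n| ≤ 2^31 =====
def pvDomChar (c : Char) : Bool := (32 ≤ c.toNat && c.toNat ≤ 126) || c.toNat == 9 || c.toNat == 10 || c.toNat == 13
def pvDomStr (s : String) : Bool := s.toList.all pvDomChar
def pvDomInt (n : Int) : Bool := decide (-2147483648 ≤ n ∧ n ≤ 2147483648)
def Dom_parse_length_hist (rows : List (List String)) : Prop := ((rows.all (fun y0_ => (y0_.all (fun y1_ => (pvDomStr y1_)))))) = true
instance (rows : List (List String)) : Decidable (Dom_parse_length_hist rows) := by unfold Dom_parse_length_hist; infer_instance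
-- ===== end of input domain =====

-- B's change: collect the valid integers into a list, sort it, then group consecutive equal
-- values into (value, count) pairs — instead of A's dict-accumulate then sort-the-items.

-- ===== PORT A =====
-- 'dict(sorted(hist.items()))': the dict's keys are distinct, so Python's lexicographic
-- pair sort coincides with the (stable) sort by first component used here.
def parse_length_hist (rows : List (List String)) : List (Int × Int) :=
  if rows.isEmpty || rows.length < 2 then []
  else
    match PySem.List.index?
        ((PySem.List.pyGetD rows (0 : Int) []).map (fun h => PySem.Str.lower (PySem.Str.strip h)))
        "length" with   -- try head.index / except ValueError
    | none => []
    | some li =>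
      PySem.List.sorted
        (((PySem.List.slice rows (some 1) none).foldl
          (fun (d : PySem.Dict Int Int) r =>
            if r.length ≤ li then d
            else
              match PySem.Int.ofStr? (PySem.List.pyGetD r (li : Int) "") with  -- try int(r[li]) / except
              | none => d
              | some L => d.insert L (d.getD L 0 + 1))
          PySem.Dict.empty).items)
        Prod.fst false

-- ===== PORT B =====
-- itertools.groupby over the sorted list: run-length encode consecutive equal values.
def pvRuns : Int → Int → List Int → List (Int × Int)
  | k, c, [] => [(k, c)]
  | k, c, x :: xs => if x = k then pvRuns k (c + 1) xs else (k, c) :: pvRuns x 1 xs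

def pvGroup : List Int → List (Int × Int)
  | [] => []
  | x :: xs => pvRuns x 1 xs

-- 'if "length" not in head: return {}' then 'li = head.index("length")': index? is some
-- exactly when "length" ∈ head, so the membership test and the index are the one match below.
def parse_length_hist_alt (rows : List (List String)) : List (Int × Int) :=
  if rows.isEmpty || rows.length < 2 then []
  else
    match PySem.List.index?
        ((PySem.List.pyGetD rows (0 : Int) []).map (fun h => PySem.Str.lower (PySem.Str.strip h)))
        "length" with
    | none => []
    | some li =>
      pvGroup (PySem.List.sorted
        ((PySem.List.slice rows (some 1) none).foldl
          (fun (acc : List Int) r =>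
            if li < r.length then
              match PySem.Int.ofStr? (PySem.List.pyGetD r (li : Int) "") with
              | none => acc
              | some L => acc ++ [L]
            else acc)
          [])
        (fun x => x) false)

-- ===== PRECONDITION & SPEC =====
def Spec_parse_length_hist (rows : List (List String)) (out : List (Int × Int)) : Prop := out = parse_length_hist_alt rows
instance (rows : List (List String)) (out : List (Int × Int)) : Decidable (Spec_parse_length_hist rows out) := by unfold Spec_parse_length_hist; infer_instance

-- ===== CLAIM (what is proved, stated in full; the proofs are below) =====
def Claim_equal_parse_length_hist : Prop := ∀ (rows : List (List String)), Dom_parse_length_hist rows → Spec_parse_length_hist rows (parse_length_hist rows)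

-- ===== LEMMAS AND PROOFS =====

-- the common per-row extractor: some L iff the row is long enough and parses as an int
def pvStep (li : Nat) (r : List String) : Option Int :=
  if li < r.length then PySem.Int.ofStr? (PySem.List.pyGetD r (li : Int) "") else none

theorem foldA_eq_filterMap (li : Nat) (l : List (List String)) (d : PySem.Dict Int Int) :
    l.foldl
      (fun (d : PySem.Dict Int Int) r =>
        if r.length ≤ li then d
        else
          match PySem.Int.ofStr? (PySem.List.pyGetD r (li : Int) "") with
          | none => d
          | some L => d.insert L (d.getD L 0 + 1)) d
    = (l.filterMap (pvStep li)).foldl (fun d L => d.insert L (d.getD L 0 + 1)) d := by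
  induction l generalizing d with
  | nil => rfl
  | cons r l ih =>
      simp only [List.foldl_cons, List.filterMap_cons, pvStep]
      by_cases h : r.length ≤ li
      · rw [if_pos h, if_neg (by omega)]
        exact ih d
      · rw [if_neg h, if_pos (by omega)]
        cases PySem.Int.ofStr? (PySem.List.pyGetD r (li : Int) "") with
        | none => simpa [pvStep] using ih d
        | some L => simpa [pvStep] using ih (d.insert L (d.getD L 0 + 1))

theorem foldB_eq_filterMap (li : Nat) (l : List (List String)) (acc : List Int) :
    l.foldl
      (fun (acc : List Int) r =>
        if li < r.length then
          match PySem.Int.ofStr? (PySem.List.pyGetD r (li : Int) "") with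
          | none => acc
          | some L => acc ++ [L]
        else acc) acc
    = acc ++ l.filterMap (pvStep li) := by
  induction l generalizing acc with
  | nil => simp
  | cons r l ih =>
      simp only [List.foldl_cons, List.filterMap_cons, pvStep]
      by_cases h : li < r.length
      · rw [if_pos h, if_pos h]
        cases PySem.Int.ofStr? (PySem.List.pyGetD r (li : Int) "") with
        | none => simpa [pvStep] using ih acc
        | some L => simpa [pvStep, List.append_assoc] using ih (acc ++ [L])
      · rw [if_neg h, if_neg h]
        exact ih acc

-- membership in pvRuns over a sorted suffix whose elements all dominate k
theorem pvRuns_mem (s : List Int) (k c : Int)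
    (hs : s.Pairwise (· ≤ ·)) (hk : ∀ x ∈ s, k ≤ x) (k' c' : Int) :
    (k', c') ∈ pvRuns k c s ↔
      (k' = k ∧ c' = c + s.count k) ∨ (k' ∈ s ∧ k' ≠ k ∧ c' = s.count k') := by
  induction s generalizing k c with
  | nil => simp [pvRuns]
  | cons x xs ih =>
      rcases List.pairwise_cons.mp hs with ⟨hx, hxs⟩
      by_cases hxk : x = k
      · subst hxk
        rw [pvRuns, if_pos rfl, ih _ _ hxs (fun y hy => le_trans (hk x (by simp)) (hx y hy))]
        constructor
        · rintro (⟨rfl, rfl⟩ | ⟨h1, h2, rfl⟩)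
          · exact Or.inl ⟨rfl, by simp; ring⟩
          · exact Or.inr ⟨by simp [h1], h2, by simp [List.count_cons, h2, Ne.symm h2]⟩
        · rintro (⟨rfl, rfl⟩ | ⟨h1, h2, rfl⟩)
          · exact Or.inl ⟨rfl, by simp; ring⟩
          · refine Or.inr ⟨?_, h2, by simp [List.count_cons, h2, Ne.symm h2]⟩
            rcases List.mem_cons.mp h1 with h | h
            · exact absurd h h2
            · exact h
      · have hkx : k < x := lt_of_le_of_ne (hk x (by simp)) (fun e => hxk e.symm)
        have hknx : k ∉ x :: xs := by
          intro hmem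
          rcases List.mem_cons.mp hmem with h | h
          · exact hxk h.symm
          · exact hxk (le_antisymm (hx k h) (hk x (by simp)))
        rw [pvRuns, if_neg hxk]
        rw [List.mem_cons, ih x 1 hxs hx, Prod.mk.injEq]
        have hcnt : (x :: xs).count k = 0 := List.count_eq_zero.mpr hknx
        constructor
        · rintro (⟨rfl, rfl⟩ | (⟨rfl, rfl⟩ | ⟨h1, h2, rfl⟩))
          · exact Or.inl ⟨rfl, by omega⟩
          · exact Or.inr ⟨by simp, hxk, by simp; ring⟩
          · exact Or.inr ⟨by simp [h1], fun e => hknx (List.mem_cons_of_mem x (e ▸ h1)),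
              by simp [Ne.symm h2]⟩
        · rintro (⟨rfl, rfl⟩ | ⟨h1, h2, rfl⟩)
          · exact Or.inl ⟨rfl, by omega⟩
          · by_cases hkx' : k' = x
            · subst hkx'
              exact Or.inr (Or.inl ⟨rfl, by simp; ring⟩)
            · have h : k' ∈ xs := (List.mem_cons.mp h1).resolve_left hkx'
              exact Or.inr (Or.inr ⟨h, hkx', by simp [Ne.symm hkx']⟩)

theorem pvGroup_mem (s : List Int) (hs : s.Pairwise (· ≤ ·)) (k c : Int) :
    (k, c) ∈ pvGroup s ↔ k ∈ s ∧ c = s.count k := by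
  cases s with
  | nil => simp [pvGroup]
  | cons x xs =>
      rcases List.pairwise_cons.mp hs with ⟨hx, hxs⟩
      rw [pvGroup, pvRuns_mem xs x 1 hxs hx]
      constructor
      · rintro (⟨rfl, rfl⟩ | ⟨h1, h2, rfl⟩)
        · exact ⟨by simp, by simp; ring⟩
        · exact ⟨by simp [h1], by simp [Ne.symm h2]⟩
      · rintro ⟨h1, rfl⟩
        rcases List.mem_cons.mp h1 with h | h
        · subst h
          exact Or.inl ⟨rfl, by simp; ring⟩
        · by_cases hkx : k = x
          · subst hkx
            exact Or.inl ⟨rfl, by simp; ring⟩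
          · exact Or.inr ⟨h, hkx, by simp [Ne.symm hkx]⟩

theorem pvRuns_pairwise (s : List Int) (k c : Int)
    (hs : s.Pairwise (· ≤ ·)) (hk : ∀ x ∈ s, k ≤ x) :
    (pvRuns k c s).Pairwise (fun a b => a.1 < b.1) := by
  induction s generalizing k c with
  | nil => simp [pvRuns]
  | cons x xs ih =>
      rcases List.pairwise_cons.mp hs with ⟨hx, hxs⟩
      by_cases hxk : x = k
      · subst hxk
        rw [pvRuns, if_pos rfl]
        exact ih _ _ hxs (fun y hy => le_trans (hk x (by simp)) (hx y hy))
      · rw [pvRuns, if_neg hxk]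
        refine List.pairwise_cons.mpr ⟨?_, ih x 1 hxs hx⟩
        intro p hp
        have hkx : k < x := lt_of_le_of_ne (hk x (by simp)) (fun e => hxk e.symm)
        rcases (pvRuns_mem xs x 1 hxs hx p.1 p.2).mp (by simpa using hp) with ⟨h1, _⟩ | ⟨h1, _, _⟩
        · simpa [h1] using hkx
        · exact lt_of_lt_of_le hkx (hx p.1 h1)

theorem pvGroup_pairwise (s : List Int) (hs : s.Pairwise (· ≤ ·)) :
    (pvGroup s).Pairwise (fun a b => a.1 < b.1) := by
  cases s with
  | nil => simp [pvGroup]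
  | cons x xs =>
      rcases List.pairwise_cons.mp hs with ⟨hx, hxs⟩
      exact pvRuns_pairwise xs x 1 hxs hx

-- the central fact: A's sorted counter-items = B's grouped sorted list, for any multiset
theorem sorted_counter_items_eq_group (ms : List Int) :
    PySem.List.sorted (PySem.Dict.counter ms).items Prod.fst false
      = pvGroup (PySem.List.sorted ms (fun x => x) false) := by
  set s := PySem.List.sorted ms (fun x => x) false with hsdef
  have hperm : s.Perm ms := PySem.List.sorted_perm ms (fun x => x) false
  have hsorted : s.Pairwise (· ≤ ·) := PySem.List.sorted_pairwise ms (fun x => x)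
  have hpwB := pvGroup_pairwise s hsorted
  have hnodB : (pvGroup s).Nodup :=
    hpwB.imp (fun h => by intro e; rw [e] at h; exact lt_irrefl _ h)
  have hitems : (PySem.Dict.counter ms).items
      = (PySem.Set.ofList ms).map (fun k => (k, (ms.count k : Int))) :=
    PySem.Dict.items_counter ms
  have hnodA : ((PySem.Set.ofList ms).map (fun k => (k, (ms.count k : Int)))).Nodup :=
    (PySem.Set.nodup_ofList ms).map (fun a b e => (Prod.mk.injEq _ _ _ _ ▸ e).1)
  have hmemiff : ∀ p, p ∈ pvGroup s ↔ p ∈ (PySem.Set.ofList ms).map (fun k => (k, (ms.count k : Int))) := by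
    rintro ⟨k, c⟩
    rw [pvGroup_mem s hsorted k c]
    simp only [List.mem_map, PySem.Set.mem_ofList]
    constructor
    · rintro ⟨h1, rfl⟩
      exact ⟨k, hperm.mem_iff.mp h1, by rw [hperm.count_eq]⟩
    · rintro ⟨k0, h1, h2⟩
      rcases Prod.mk.injEq _ _ _ _ ▸ h2 with ⟨rfl, rfl⟩
      exact ⟨hperm.mem_iff.mpr h1, by exact_mod_cast (hperm.count_eq _).symm⟩
  have hP : (pvGroup s).Perm ((PySem.Set.ofList ms).map (fun k => (k, (ms.count k : Int)))) :=
    (List.perm_ext_iff_of_nodup hnodB hnodA).mpr hmemiff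
  rw [hitems]
  exact PySem.List.sorted_eq_of_perm_of_pairwise_lt _ _ _ hP hpwB

-- ===== VERDICT (by name: the statement is the Claim_ definition above) =====
theorem parse_length_hist_spec : Claim_equal_parse_length_hist := by
  intro rows _
  unfold Spec_parse_length_hist parse_length_hist parse_length_hist_alt
  by_cases h0 : rows.isEmpty || rows.length < 2
  · rw [if_pos h0, if_pos h0]
  · rw [if_neg h0, if_neg h0]
    cases hidx : PySem.List.index? ((PySem.List.pyGetD rows (0 : Int) []).map
        (fun h => PySem.Str.lower (PySem.Str.strip h))) "length" with
    | none => rfl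
    | some li =>
        simp only
        rw [foldA_eq_filterMap, foldB_eq_filterMap, List.nil_append,
          PySem.Dict.foldl_insert_getD_add_one_eq_counter]
        exact sorted_counter_items_eq_group _
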